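-- pv_equiv track=rewrite | github.com/Mustafa00124/Zero_Shot_Semantic_Matching-for-PSL | methods/c3d_baseline.py | _remap_subset
-- ===== SOURCE A (Python) =====
-- def _remap_subset(samples):
--     """Remap labels in given sample list to a compact 0..K-1 space."""
--     old_to_new = {}
--     new_samples = []
--     next_idx = 0
--     for path, y in samples:
--         if y not in old_to_new:
--             old_to_new[y] = next_idx
--             next_idx += 1
--         new_samples.append((path, old_to_new[y]))
--     return new_samples, next_idx
-- ===== SOURCE B (Python) =====
-- def _remap_subset(samples):
--     """Remap labels in given sample list to a compact 0..K-1 space."""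
--     # Backward scan: the value surviving in pos[y] is y's FIRST index in samples.
--     pos = {}
--     for i in range(len(samples) - 1, -1, -1):
--         pos[samples[i][1]] = i
--     # The new label of y is the rank of y's first-occurrence position among all
--     # first-occurrence positions (ranking by position = first-appearance order).
--     order = sorted(pos.values())
--     rank = {p: r for r, p in enumerate(order)}
--     return [(path, rank[pos[y]]) for path, y in samples], len(order)
-- ===== Notes on version B (the rewrite author's own statement) =====
-- stated objective: alternative
-- what changed: Instead of A's forward loop with a first-seen counter dict, B scans the samples backward so overwrites leave each label's first-occurrence index, then sorts those indices and assigns each label the rank of its first index in that sorted order.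
import Mathlib
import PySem

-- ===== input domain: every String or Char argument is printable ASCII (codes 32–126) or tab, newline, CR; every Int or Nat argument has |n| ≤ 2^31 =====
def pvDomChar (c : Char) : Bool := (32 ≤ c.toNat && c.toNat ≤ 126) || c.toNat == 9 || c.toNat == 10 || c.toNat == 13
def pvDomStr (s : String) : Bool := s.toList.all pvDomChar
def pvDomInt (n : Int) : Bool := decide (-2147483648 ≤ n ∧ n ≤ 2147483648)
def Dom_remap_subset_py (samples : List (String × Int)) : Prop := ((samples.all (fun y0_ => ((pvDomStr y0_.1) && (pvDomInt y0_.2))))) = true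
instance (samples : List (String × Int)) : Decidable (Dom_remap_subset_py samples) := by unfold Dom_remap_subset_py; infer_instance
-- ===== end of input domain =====

-- B replaces A's forward first-seen counter by a different mechanism: a backward
-- overwrite scan leaves each label's FIRST index, and the new label is the rank of
-- that index in the sorted list of first-occurrence indices.

-- ===== PORT A =====
-- one iteration of A's for-loop over (old_to_new, new_samples, next_idx);
-- old_to_new[y] after the membership test is a guaranteed-present lookup, so getD is exact
def remapStepA (st : PySem.Dict Int Int × List (String × Int) × Int) (py : String × Int) :
    PySem.Dict Int Int × List (String × Int) × Int :=
  if st.1.contains py.2 then (st.1, st.2.1 ++ [(py.1, st.1.getD py.2 0)], st.2.2)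
  else (st.1.insert py.2 st.2.2, st.2.1 ++ [(py.1, st.2.2)], st.2.2 + 1)

def remap_subset_py (samples : List (String × Int)) : (List (String × Int)) × Int :=
  let st := samples.foldl remapStepA ((PySem.Dict.empty : PySem.Dict Int Int), ([] : List (String × Int)), (0 : Int))
  (st.2.1, st.2.2)

-- ===== PORT B =====
-- samples[i][1] with 0 ≤ i < len(samples) is an in-range index, so pyGet? is some and
-- the .getD default is never used; rank[pos[y]] / pos[y] are guaranteed-present lookups, so getD is exact
def remap_subset_py_alt (samples : List (String × Int)) : (List (String × Int)) × Int :=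
  let n : Int := (samples.length : Int)
  let pos := (PySem.List.pyRange (n - 1) (-1) (-1)).foldl
      (fun d i => d.insert ((PySem.List.pyGet? samples i).getD ("", 0)).2 i)
      (PySem.Dict.empty : PySem.Dict Int Int)
  let order := PySem.List.sorted pos.values (fun x => x)
  let rank := (PySem.List.enumerate order 0).foldl (fun d p => d.insert p.2 p.1)
      (PySem.Dict.empty : PySem.Dict Int Int)
  (samples.map (fun py => (py.1, rank.getD (pos.getD py.2 0) 0)), (order.length : Int))

-- ===== PRECONDITION & SPEC =====
def Spec_remap_subset_py (samples : List (String × Int)) (out : (List (String × Int)) × Int) : Prop := out = remap_subset_py_alt samples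
instance (samples : List (String × Int)) (out : (List (String × Int)) × Int) : Decidable (Spec_remap_subset_py samples out) := by unfold Spec_remap_subset_py; infer_instance

-- ===== CLAIM (what is proved, stated in full; the proofs are below) =====
def Claim_equal_remap_subset_py : Prop := ∀ (samples : List (String × Int)), Dom_remap_subset_py samples → Spec_remap_subset_py samples (remap_subset_py samples)

-- ===== LEMMAS AND PROOFS =====

-- ---------- A-side: A's loop in closed form ----------

-- the labels seen so far, first appearance first (A's dict-key order)
def seenAcc (seen : List Int) (l : List (String × Int)) : List Int :=
  l.foldl (fun acc py => PySem.Set.add acc py.2) seen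

lemma seenAcc_nil (seen : List Int) : seenAcc seen [] = seen := rfl

lemma seenAcc_cons (seen : List Int) (py : String × Int) (l : List (String × Int)) :
    seenAcc seen (py :: l) = seenAcc (PySem.Set.add seen py.2) l := rfl

lemma idxOf_seenAcc_of_mem (l : List (String × Int)) (seen : List Int) (y : Int) (h : y ∈ seen) :
    (seenAcc seen l).idxOf y = seen.idxOf y := by
  induction l generalizing seen with
  | nil => rfl
  | cons py l ih =>
      rw [seenAcc_cons]
      by_cases hm : py.2 ∈ seen
      · rw [show PySem.Set.add seen py.2 = seen by simp [PySem.Set.add, hm]]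
        exact ih _ h
      · rw [show PySem.Set.add seen py.2 = seen ++ [py.2] by simp [PySem.Set.add, hm]]
        rw [ih _ (by simp [h]), List.idxOf_append_of_mem h]

-- invariant-carrying characterisation of A's loop
lemma foldl_remapStepA (l : List (String × Int)) (seen : List Int)
    (d : PySem.Dict Int Int) (ns : List (String × Int))
    (hc : ∀ y, d.contains y = decide (y ∈ seen))
    (hg : ∀ y ∈ seen, d.getD y 0 = (seen.idxOf y : Int)) :
    (l.foldl remapStepA (d, ns, (seen.length : Int))).2 =
      (ns ++ l.map (fun py => (py.1, ((seenAcc seen l).idxOf py.2 : Int))),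
       ((seenAcc seen l).length : Int)) := by
  induction l generalizing seen d ns with
  | nil => simp [seenAcc_nil]
  | cons py l ih =>
      rw [List.foldl_cons, seenAcc_cons]
      by_cases hm : py.2 ∈ seen
      · have hadd : PySem.Set.add seen py.2 = seen := by simp [PySem.Set.add, hm]
        have : remapStepA (d, ns, (seen.length : Int)) py =
            (d, ns ++ [(py.1, (seen.idxOf py.2 : Int))], (seen.length : Int)) := by
          simp [remapStepA, hc, hm, hg _ hm]
        rw [this, ih seen d _ hc hg, hadd]
        simp [idxOf_seenAcc_of_mem l seen py.2 hm]
      · have hadd : PySem.Set.add seen py.2 = seen ++ [py.2] := by simp [PySem.Set.add, hm]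
        have hstep : remapStepA (d, ns, (seen.length : Int)) py =
            (d.insert py.2 (seen.length : Int), ns ++ [(py.1, (seen.length : Int))],
             ((seen ++ [py.2]).length : Int)) := by
          simp [remapStepA, hc, hm]
        rw [hstep, hadd, ih (seen ++ [py.2]) _ _ ?_ ?_]
        · have hidx : (seen ++ [py.2]).idxOf py.2 = seen.length := by
            rw [List.idxOf_append_of_notMem hm]; simp
          simp only [List.map_cons, idxOf_seenAcc_of_mem l (seen ++ [py.2]) py.2 (by simp), hidx]
          simp
        · intro y
          rw [PySem.Dict.contains_insert, hc]
          by_cases hy : y = py.2 <;> simp [hy]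
        · intro y hy
          rw [PySem.Dict.getD_insert]
          by_cases hy2 : y = py.2
          · subst hy2
            rw [List.idxOf_append_of_notMem hm]; simp
          · simp only [if_neg hy2]
            have hys : y ∈ seen := by
              rcases List.mem_append.mp hy with h | h
              · exact h
              · simp at h; exact absurd h hy2
            rw [hg _ hys, List.idxOf_append_of_mem hys]

-- A computed in closed form over the dedup of the label list
lemma remap_subset_py_eq (samples : List (String × Int)) :
    remap_subset_py samples =
      (samples.map (fun py => (py.1, ((PySem.List.dedup (samples.map Prod.snd)).idxOf py.2 : Int))),
       ((PySem.List.dedup (samples.map Prod.snd)).length : Int)) := by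
  have h := foldl_remapStepA samples [] PySem.Dict.empty []
    (by intro y; simp) (by intro y hy; simp at hy)
  have hseen : seenAcc [] samples = PySem.List.dedup (samples.map Prod.snd) := by
    rw [PySem.List.dedup_eq_ofList]
    unfold seenAcc PySem.Set.ofList
    rw [List.foldl_map]
    rfl
  simp only [List.length_nil, Nat.cast_zero, hseen, List.nil_append] at h
  simp [remap_subset_py, h]

-- ---------- B-side generic lemmas ----------

-- a fold of inserts: the surviving binding of a key is its LAST occurrence in the list
lemma get?_foldl_insert_pairs (l : List (Int × Int)) (d : PySem.Dict Int Int) (k : Int) :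
    (l.foldl (fun d p => d.insert p.1 p.2) d).get? k =
      (match l.reverse.find? (fun p => p.1 == k) with
       | some p => some p.2
       | none => d.get? k) := by
  induction l generalizing d with
  | nil => simp
  | cons p l ih =>
      rw [List.foldl_cons, ih, List.reverse_cons, List.find?_append]
      cases hf : l.reverse.find? (fun p => p.1 == k) with
      | some q => simp
      | none =>
          by_cases hk : p.1 = k
          · subst hk; simp [PySem.Dict.get?_insert_self]
          · have hb : (p.1 == k) = false := by simp [hk]
            simp [hb, PySem.Dict.get?_insert_of_ne _ _ (Ne.symm hk)]

-- first match on swapped enumerate pairs = first occurrence index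
lemma find?_enumerate_swap (xs : List Int) (s y : Int) :
    (((PySem.List.enumerate xs s).map (fun p => (p.2, p.1))).find? (fun p => p.1 == y)) =
      (if y ∈ xs then some (y, s + (xs.idxOf y : Int)) else none) := by
  induction xs generalizing s with
  | nil => simp [PySem.List.enumerate_nil]
  | cons x xs ih =>
      rw [PySem.List.enumerate_cons, List.map_cons]
      by_cases hxy : x = y
      · subst hxy
        rw [List.find?_cons_of_pos (by simp)]
        simp
      · rw [List.find?_cons_of_neg (by simp [hxy]), ih (s + 1)]
        by_cases hm : y ∈ xs
        · rw [if_pos hm, if_pos (by simp [hm]), List.idxOf_cons_ne _ hxy]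
          have harith : s + 1 + (xs.idxOf y : Int) = s + (((xs.idxOf y).succ : Nat) : Int) := by
            push_cast; ring
          rw [harith]
        · rw [if_neg hm, if_neg (by simp [hm]; exact fun h => hxy h.symm)]

-- idxOf through map of a function injective on the list
lemma idxOf_map_on {α β : Type} [DecidableEq α] [DecidableEq β] (l : List α) (f : α → β) (y : α)
    (hy : y ∈ l) (hinj : ∀ a ∈ l, f a = f y → a = y) :
    (l.map f).idxOf (f y) = l.idxOf y := by
  induction l with
  | nil => simp at hy
  | cons x l ih =>
      by_cases hxy : x = y
      · subst hxy; simp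
      · have hfx : f x ≠ f y := fun h => hxy (hinj x (by simp) h)
        have hm : y ∈ l := by rcases List.mem_cons.mp hy with h | h; exact absurd h.symm hxy; exact h
        rw [List.map_cons, List.idxOf_cons_ne _ hfx, List.idxOf_cons_ne _ hxy,
          ih hm (fun a ha h => hinj a (by simp [ha]) h)]

-- the dedup list is ordered by strictly increasing first-occurrence index
lemma dedup_pairwise_idxOf (xs : List Int) :
    (PySem.List.dedup xs).Pairwise (fun a b => xs.idxOf a < xs.idxOf b) := by
  rw [PySem.List.dedup_eq_ofList]
  induction xs with
  | nil => simp
  | cons x xs ih =>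
      rw [PySem.Set.ofList_cons]
      refine List.Pairwise.cons ?_ ?_
      · intro b hb
        have hbx : b ∈ PySem.Set.ofList xs ∧ b ≠ x := (PySem.Set.mem_discard _ _ _).mp hb
        rw [List.idxOf_cons_self, List.idxOf_cons_ne _ (Ne.symm hbx.2)]
        exact Nat.succ_pos _
      · have hsub : (PySem.Set.discard (PySem.Set.ofList xs) x).Sublist (PySem.Set.ofList xs) := by
          unfold PySem.Set.discard
          exact List.filter_sublist
        refine (ih.sublist hsub).imp_of_mem ?_
        intro a b ha hb hab
        have hax : a ≠ x := ((PySem.Set.mem_discard _ _ _).mp ha).2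
        have hbx : b ≠ x := ((PySem.Set.mem_discard _ _ _).mp hb).2
        rw [List.idxOf_cons_ne _ (Ne.symm hax), List.idxOf_cons_ne _ (Ne.symm hbx)]
        exact Nat.succ_lt_succ hab

-- B's rank dict: items are the enumerate pairs swapped
lemma rank_items (uniq : List Int) (hnd : uniq.Nodup) :
    ((PySem.List.enumerate uniq 0).foldl (fun d p => d.insert p.2 p.1)
        (PySem.Dict.empty : PySem.Dict Int Int)).items =
      (PySem.List.enumerate uniq 0).map (fun p => (p.2, p.1)) := by
  have h := PySem.Dict.items_foldl_insert_fresh (PySem.List.enumerate uniq 0)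
    (fun p => p.2) (fun p => p.1) (PySem.Dict.empty : PySem.Dict Int Int)
    (by intro a _; simp) (by rw [PySem.List.map_snd_enumerate]; exact hnd)
  simpa using h

lemma mem_enumerate_idxOf (xs : List Int) (s : Int) (y : Int) (h : y ∈ xs) :
    ((s + (xs.idxOf y : Int)), y) ∈ PySem.List.enumerate xs s := by
  induction xs generalizing s with
  | nil => simp at h
  | cons x xs ih =>
      rw [PySem.List.enumerate_cons]
      by_cases hy : y = x
      · subst hy; simp
      · have hmem : y ∈ xs := by rcases List.mem_cons.mp h with h' | h' <;> [exact absurd h' hy; exact h']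
        have := ih (s + 1) hmem
        rw [List.idxOf_cons_ne _ (by exact fun e => hy e.symm)]
        right
        have harith : s + ((xs.idxOf y + 1 : Nat) : Int) = s + 1 + (xs.idxOf y : Int) := by push_cast; ring
        rw [harith]
        exact this

-- rank dict lookup = index in the list (nodup list)
lemma rank_getD (uniq : List Int) (hnd : uniq.Nodup) (p : Int) (hp : p ∈ uniq) :
    ((PySem.List.enumerate uniq 0).foldl (fun d p => d.insert p.2 p.1)
        (PySem.Dict.empty : PySem.Dict Int Int)).getD p 0 = (uniq.idxOf p : Int) := by
  set rank := (PySem.List.enumerate uniq 0).foldl (fun d p => d.insert p.2 p.1)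
    (PySem.Dict.empty : PySem.Dict Int Int) with hrank
  have hitems : rank.items = (PySem.List.enumerate uniq 0).map (fun p => (p.2, p.1)) :=
    rank_items uniq hnd
  have hkeyslist : rank.keys = uniq := by
    show rank.items.map (·.1) = uniq
    rw [hitems, List.map_map]
    exact PySem.List.map_snd_enumerate uniq 0
  have hkeys : rank.keys.Nodup := by rw [hkeyslist]; exact hnd
  refine PySem.Dict.getD_of_mem_items rank ?_ hkeys 0
  rw [hitems, List.mem_map]
  exact ⟨((0 : Int) + (uniq.idxOf p : Int), p), by simpa using mem_enumerate_idxOf uniq 0 p hp, by simp⟩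

-- ---------- B computed in the same closed form ----------
lemma remap_subset_py_alt_eq (samples : List (String × Int)) :
    remap_subset_py_alt samples =
      (samples.map (fun py => (py.1, ((PySem.List.dedup (samples.map Prod.snd)).idxOf py.2 : Int))),
       ((PySem.List.dedup (samples.map Prod.snd)).length : Int)) := by
  set labels := samples.map Prod.snd with hlabels
  set lab : Int → Int := fun i => ((PySem.List.pyGet? samples i).getD ("", 0)).2 with hlab
  set rng := PySem.List.pyRange ((samples.length : Int) - 1) (-1) (-1) with hrng
  set pos := rng.foldl (fun d i => d.insert (lab i) i)
      (PySem.Dict.empty : PySem.Dict Int Int) with hposdef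
  set order := PySem.List.sorted pos.values (fun x => x) with horderdef
  set rank := (PySem.List.enumerate order 0).foldl (fun d p => d.insert p.2 p.1)
      (PySem.Dict.empty : PySem.Dict Int Int) with hrankdef
  have hunfold : remap_subset_py_alt samples =
      (samples.map (fun py => (py.1, rank.getD (pos.getD py.2 0) 0)), (order.length : Int)) := rfl
  have hlabGetD : ∀ i : Int, lab i = PySem.List.pyGetD labels i 0 := by
    intro i
    rw [hlab, hlabels]
    have := PySem.List.pyGetD_map (Prod.snd : String × Int → Int) samples i ("", 0)
    simp only [PySem.List.pyGetD, PySem.List.pyGet?] at this ⊢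
    exact this.symm
  -- the backward loop runs over the reversed forward range
  have hrange : rng = (PySem.List.pyRange 0 (samples.length : Int) 1).reverse := by
    rw [hrng]
    have := PySem.List.pyRange_neg_one_eq_reverse ((samples.length : Int) - 1) (-1)
    simpa using this
  -- the index loop as a fold over (label, index) pairs
  have hfold : pos = ((rng.map (fun i => (lab i, i))).foldl
      (fun d p => d.insert p.1 p.2) (PySem.Dict.empty : PySem.Dict Int Int)) := by
    rw [hposdef, List.foldl_map]
  have hpairs : ((PySem.List.pyRange 0 (samples.length : Int) 1).map (fun i => (lab i, i))) =
      (PySem.List.enumerate labels 0).map (fun p => (p.2, p.1)) := by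
    rw [PySem.List.enumerate_eq_map_pyRange labels 0, List.map_map]
    have hlen : PySem.List.len labels = (samples.length : Int) := by
      simp [PySem.List.len, hlabels]
    rw [hlen]
    exact List.map_congr_left (fun i _ => by simp [hlabGetD i])
  have hget? : ∀ y : Int, pos.get? y =
      (if y ∈ labels then some ((labels.idxOf y : Int)) else none) := by
    intro y
    rw [hfold, get?_foldl_insert_pairs, hrange, List.map_reverse, List.reverse_reverse,
      hpairs, find?_enumerate_swap]
    by_cases hm : y ∈ labels <;> simp [hm]
  have hpos : ∀ y ∈ labels, pos.getD y 0 = (labels.idxOf y : Int) := by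
    intro y hy
    rw [PySem.Dict.getD_eq_get?_getD, hget? y, if_pos hy]
    rfl
  -- pos.keys = set(reversed(labels))
  have hkeys : pos.keys = PySem.Set.ofList labels.reverse := by
    rw [hposdef,
      PySem.Dict.keys_foldl_insert_key rng lab (fun _ i => i) (PySem.Dict.empty : PySem.Dict Int Int)]
    have hmap : rng.map lab = labels.reverse := by
      rw [hrange, List.map_reverse]
      have h1 : (PySem.List.pyRange 0 (samples.length : Int) 1).map lab =
          (PySem.List.pyRange 0 ((labels.length : Int)) 1).map (fun j => PySem.List.pyGetD labels j 0) := by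
        rw [hlabels, List.length_map]
        exact List.map_congr_left (fun i _ => hlabGetD i)
      rw [h1, PySem.List.map_pyGetD_pyRange_zero']
    rw [hmap]
    simp [PySem.Set.update_nil_left]
  have hkeysnodup : pos.keys.Nodup := by rw [hkeys]; exact PySem.Set.nodup_ofList _
  -- pos.values is a permutation of the first-occurrence indices of the dedup labels
  set target : List Int := (PySem.List.dedup labels).map (fun k => (labels.idxOf k : Int)) with htarget
  have hperm : target.Perm pos.values := by
    rw [PySem.Dict.values_eq_map_keys pos hkeysnodup 0]
    have hkperm : (PySem.List.dedup labels).Perm pos.keys := by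
      rw [hkeys, PySem.List.dedup_eq_ofList]
      refine (List.perm_ext_iff_of_nodup (PySem.Set.nodup_ofList _) (PySem.Set.nodup_ofList _)).mpr ?_
      intro a
      simp [PySem.Set.mem_ofList]
    refine List.Perm.trans ?_ (hkperm.map _)
    rw [htarget]
    refine List.Perm.of_eq (List.map_congr_left ?_)
    intro k hk
    rw [hpos k (by rw [PySem.List.dedup_eq_ofList, PySem.Set.mem_ofList] at hk; exact hk)]
  have htargetlt : target.Pairwise (fun a b => a < b) := by
    rw [htarget]
    refine (List.pairwise_map).mpr ?_
    refine (dedup_pairwise_idxOf labels).imp ?_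
    intro a b hab
    exact_mod_cast hab
  have horder : order = target := by
    rw [horderdef]
    exact PySem.List.sorted_eq_of_perm_of_pairwise_lt _ _ _ hperm htargetlt
  have hnd : target.Nodup := htargetlt.nodup
  have hrank2 : rank = (PySem.List.enumerate target 0).foldl (fun d p => d.insert p.2 p.1)
      (PySem.Dict.empty : PySem.Dict Int Int) := by rw [hrankdef, horder]
  rw [hunfold, hrank2, horder]
  refine Prod.ext ?_ ?_
  · refine List.map_congr_left ?_
    intro py hpy
    have hyl : py.2 ∈ labels := by rw [hlabels]; exact List.mem_map.mpr ⟨py, hpy, rfl⟩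
    have hyd : py.2 ∈ PySem.List.dedup labels := by
      rw [PySem.List.dedup_eq_ofList, PySem.Set.mem_ofList]; exact hyl
    have hpin : (labels.idxOf py.2 : Int) ∈ target := by
      rw [htarget]; exact List.mem_map.mpr ⟨py.2, hyd, rfl⟩
    rw [hpos py.2 hyl, rank_getD target hnd _ hpin]
    have hidx : target.idxOf ((labels.idxOf py.2 : Int)) = (PySem.List.dedup labels).idxOf py.2 := by
      rw [htarget]
      refine idxOf_map_on _ (fun k => ((labels.idxOf k : Nat) : Int)) _ hyd ?_
      intro a ha hfa
      have hfeq : labels.idxOf a = labels.idxOf py.2 := by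
        have h' : ((labels.idxOf a : Nat) : Int) = ((labels.idxOf py.2 : Nat) : Int) := hfa
        exact_mod_cast h'
      have hal : a ∈ labels := by
        rw [PySem.List.dedup_eq_ofList, PySem.Set.mem_ofList] at ha; exact ha
      have h1 : labels[labels.idxOf a]'(List.idxOf_lt_length_of_mem hal) = a :=
        List.getElem_idxOf _
      have h2 : labels[labels.idxOf py.2]'(List.idxOf_lt_length_of_mem hyl) = py.2 :=
        List.getElem_idxOf _
      rw [← h1, ← h2]
      congr 1
    rw [hidx]
  · simp [htarget]

-- ===== VERDICT (by name: the statement is the Claim_ definition above) =====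
theorem remap_subset_py_spec : Claim_equal_remap_subset_py := by
  intro samples _
  show remap_subset_py samples = remap_subset_py_alt samples
  rw [remap_subset_py_eq, remap_subset_py_alt_eq]
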